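-- pv_equiv track=rewrite | github.com/mikeberl/advent-of-code-24 | day_19/2.py | count_compositions
-- ===== SOURCE A (Python) =====
-- def count_compositions(towel, colors):
--     n = len(towel)
--     check = [0] * (n + 1)
--     check[0] = 1
--
--     for i in range(1, n + 1):
--         for partial in colors:
--             if i >= len(partial) and towel[i - len(partial):i] == partial:
--                 check[i] += check[i - len(partial)]
--
--     return check[n]
-- ===== SOURCE B (Python) =====
-- def count_compositions(towel, colors):
--     n = len(towel)
--     edges = [[] for _ in range(n + 1)]
--     for c in colors:
--         p = towel.find(c)
--         while p != -1:
--             edges[p + len(c)].append(p)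
--             p = towel.find(c, p + 1)
--     ways = [1] + [0] * n
--     for j in range(1, n + 1):
--         for i in edges[j]:
--             ways[j] += ways[i]
--     return ways[n]
-- ===== Notes on version B (the rewrite author's own statement) =====
-- stated objective: faster
-- what changed: Replaces A's per-position inner scan over colors (a slice comparison for every (position, color) pair) with a two-stage algorithm: stage 1 builds an occurrence index edges[j] = match start positions ending at j, enumerated with str.find's substring search; stage 2 is a single DP pass that accumulates only over the indexed matches, so the per-position scan over colors disappears.
import Mathlib
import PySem

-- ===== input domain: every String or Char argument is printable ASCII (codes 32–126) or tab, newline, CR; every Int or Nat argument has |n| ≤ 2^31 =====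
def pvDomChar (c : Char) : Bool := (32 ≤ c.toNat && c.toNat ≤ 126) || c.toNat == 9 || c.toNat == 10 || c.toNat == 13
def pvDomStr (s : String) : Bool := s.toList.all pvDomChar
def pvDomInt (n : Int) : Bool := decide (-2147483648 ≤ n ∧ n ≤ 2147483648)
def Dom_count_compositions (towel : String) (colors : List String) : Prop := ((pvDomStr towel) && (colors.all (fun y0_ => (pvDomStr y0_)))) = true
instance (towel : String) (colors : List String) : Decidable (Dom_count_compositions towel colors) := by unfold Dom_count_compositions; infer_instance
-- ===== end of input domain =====

-- B replaces A's per-position inner scan over colors with a two-stage algorithm: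
-- stage 1 builds an occurrence index edges[j] (match start positions, found with
-- str.find), stage 2 is one DP pass accumulating over the indexed matches.

-- ===== PORT A =====
-- forward DP: check[i] = count for towel[:i], inner scan over colors at every i
def count_compositions (towel : String) (colors : List String) : Int :=
  let t := towel.toList
  let n := t.length
  let check0 := (List.replicate (n + 1) (0 : Int)).set 0 1
  let check := (List.range' 1 n).foldl (fun ch (i : Nat) =>
      colors.foldl (fun ch c =>
        if c.toList.length ≤ i ∧
            PySem.List.slice t (some ((i : Int) - (c.toList.length : Int))) (some (i : Int)) = c.toList
        then ch.set i (ch.getD i 0 + ch.getD (i - c.toList.length) 0)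
        else ch) ch) check0
  check.getD n 0

-- ===== PORT B =====
-- the 'while p != -1' find loop of stage 1; fuel n+2 covers every iteration count
-- (each iteration advances the search start, which stays within 0..n+1)
def pvOccLoop (t c : List Char) : Nat → List (List Int) → Int → List (List Int)
  | 0, e, _ => e
  | fuel + 1, e, p =>
    if p = -1 then e
    else pvOccLoop t c fuel
      (PySem.List.pySetD e (p + (c.length : Int))
        (PySem.List.pyGetD e (p + (c.length : Int)) [] ++ [p]))
      (PySem.Chars.findFrom t c (p + 1) none)

-- stage 1: occurrence index; stage 2: one DP pass over the indexed matches
def count_compositions_alt (towel : String) (colors : List String) : Int :=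
  let t := towel.toList
  let n := t.length
  let edges := colors.foldl (fun e c =>
      pvOccLoop t c.toList (n + 2) e (PySem.Chars.find t c.toList))
    (List.replicate (n + 1) ([] : List Int))
  let ways := (List.range' 1 n).foldl (fun w (j : Nat) =>
      (PySem.List.pyGetD edges (j : Int) []).foldl (fun w (i : Int) =>
        PySem.List.pySetD w (j : Int)
          (PySem.List.pyGetD w (j : Int) 0 + PySem.List.pyGetD w i 0)) w)
    ((1 : Int) :: List.replicate n 0)
  PySem.List.pyGetD ways (n : Int) 0

-- ===== PRECONDITION & SPEC =====
def Spec_count_compositions (towel : String) (colors : List String) (out : Int) : Prop := out = count_compositions_alt towel colors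
instance (towel : String) (colors : List String) (out : Int) : Decidable (Spec_count_compositions towel colors out) := by unfold Spec_count_compositions; infer_instance

-- ===== CLAIM (what is proved, stated in full; the proofs are below) =====
def Claim_equal_count_compositions : Prop := ∀ (towel : String) (colors : List String), Dom_count_compositions towel colors → Spec_count_compositions towel colors (count_compositions towel colors)

-- ===== LEMMAS AND PROOFS =====

-- weighted color list: nonempty colors, each weighted 2^(number of "" after it)
-- (an "" entry doubles the running cell value in both ports; this weight captures that)
def pvWlist : List String → List (Int × String)
  | [] => []
  | c :: cs => if c = "" then pvWlist cs else ((2 : Int) ^ (cs.count ""), c) :: pvWlist cs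

lemma pvToList_nil {c : String} (h : c.toList = []) : c = "" := by
  have := congrArg String.ofList h
  rwa [String.ofList_toList] at this

lemma pvWlist_ne {cs : List String} : ∀ p ∈ pvWlist cs, p.2.toList ≠ [] := by
  induction cs with
  | nil => intro p hp; simp [pvWlist] at hp
  | cons c cs ih =>
    intro p hp
    by_cases hc : c = ""
    · exact ih p (by simpa [pvWlist, hc] using hp)
    · rw [pvWlist, if_neg hc] at hp
      rcases List.mem_cons.mp hp with h | h
      · subst h; exact fun hnil => hc (pvToList_nil hnil)
      · exact ih p h

-- prefix-direction spec: pvM s = weighted count of tilings of s, by last piece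
def pvM (ws : List (Int × String)) : List Char → Int
  | [] => 1
  | a :: s =>
      (ws.map (fun p =>
        if h : p.2.toList ≠ [] ∧ p.2.toList <:+ (a :: s)
        then p.1 * pvM ws ((a :: s).take ((a :: s).length - p.2.toList.length))
        else 0)).sum
  termination_by s => s.length
  decreasing_by
    have h1 : 1 ≤ p.2.toList.length := List.length_pos_iff.mpr h.1
    simp only [List.length_take, List.length_cons]
    omega

lemma pvM_nil (ws : List (Int × String)) : pvM ws [] = 1 := by rw [pvM]

lemma pvM_ne_nil (ws : List (Int × String)) (s : List Char) (h : s ≠ []) :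
    pvM ws s = (ws.map (fun p =>
      if p.2.toList ≠ [] ∧ p.2.toList <:+ s
      then p.1 * pvM ws (s.take (s.length - p.2.toList.length))
      else 0)).sum := by
  cases s with
  | nil => exact absurd rfl h
  | cons a s => rw [pvM]; simp only [dite_eq_ite]

-- cell lemma: the in-order fold over colors with "" doubling equals weight form
lemma pvCell (P : String → Prop) [DecidablePred P] (g : String → Int)
    (hP : ∀ c : String, c.toList = [] → P c) :
    ∀ (cs : List String) (v : Int),
      cs.foldl (fun a c => if P c then a + (if c.toList.length = 0 then a else g c) else a) v
      = 2 ^ (cs.count "") * v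
        + ((pvWlist cs).map (fun p => if P p.2 then p.1 * g p.2 else 0)).sum := by
  intro cs
  induction cs with
  | nil => intro v; simp [pvWlist]
  | cons c cs ih =>
    intro v
    by_cases hc : c = ""
    · subst hc
      have hP0 : P "" := hP "" rfl
      simp only [List.foldl_cons]
      rw [if_pos hP0, if_pos (show ("" : String).toList.length = 0 from rfl), ih (v + v),
        show pvWlist ("" :: cs) = pvWlist cs by rw [pvWlist, if_pos rfl],
        List.count_cons_self]
      ring
    · have hL : c.toList.length ≠ 0 := fun h => hc (pvToList_nil (List.eq_nil_of_length_eq_zero h))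
      have hcount : (c :: cs).count "" = cs.count "" := by simp [hc]
      rw [List.foldl_cons]
      by_cases hpc : P c
      · simp only [if_pos hpc, if_neg hL]
        rw [ih (v + g c), hcount, pvWlist, if_neg hc, List.map_cons, List.sum_cons, if_pos hpc]
        ring
      · simp only [if_neg hpc]
        rw [ih v, hcount, pvWlist, if_neg hc, List.map_cons, List.sum_cons, if_neg hpc]
        ring

-- A's match test at position i is "c is a nonempty suffix of towel[:i]"
lemma pvCondA_iff (t : List Char) (i : Nat) (hin : i ≤ t.length) (c : String) (hc : c.toList ≠ []) :
    (c.toList.length ≤ i ∧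
      PySem.List.slice t (some ((i : Int) - (c.toList.length : Int))) (some (i : Int)) = c.toList)
    ↔ c.toList ≠ [] ∧ c.toList <:+ t.take i := by
  constructor
  · rintro ⟨hL, hs⟩
    refine ⟨hc, ?_⟩
    rw [List.suffix_iff_eq_drop]
    have hlen : (List.take i t).length = i := by simp; omega
    rw [hlen, List.drop_take]
    have hcast : (i : Int) - (c.toList.length : Int) = ((i - c.toList.length : Nat) : Int) := by omega
    rw [hcast, PySem.List.slice_natCast] at hs
    rw [show i - (i - c.toList.length) = c.toList.length from by omega] at hs ⊢
    exact hs.symm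
  · rintro ⟨-, hs⟩
    have hlen : (List.take i t).length = i := by simp; omega
    have hL : c.toList.length ≤ i := by
      have := hs.length_le
      omega
    refine ⟨hL, ?_⟩
    have heq := List.suffix_iff_eq_drop.mp hs
    rw [hlen, List.drop_take] at heq
    have hcast : (i : Int) - (c.toList.length : Int) = ((i - c.toList.length : Nat) : Int) := by omega
    rw [hcast, PySem.List.slice_natCast]
    exact heq.symm

-- the inner loop over colors, started from ch.set i v, only rewrites slot i
lemma pvInnerA (t : List Char) (i : Nat) (ch : List Int) (hi : i < ch.length)
    (l : List String) :
    ∀ v : Int,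
      l.foldl (fun ch c =>
        if c.toList.length ≤ i ∧
            PySem.List.slice t (some ((i : Int) - (c.toList.length : Int))) (some (i : Int)) = c.toList
        then ch.set i (ch.getD i 0 + ch.getD (i - c.toList.length) 0)
        else ch) (ch.set i v)
      = ch.set i (l.foldl (fun a c =>
          if c.toList.length ≤ i ∧
              PySem.List.slice t (some ((i : Int) - (c.toList.length : Int))) (some (i : Int)) = c.toList
          then a + (if c.toList.length = 0 then a else ch.getD (i - c.toList.length) 0)
          else a) v) := by
  induction l with
  | nil => intro v; simp
  | cons c l ih =>
    intro v
    by_cases h : c.toList.length ≤ i ∧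
        PySem.List.slice t (some ((i : Int) - (c.toList.length : Int))) (some (i : Int)) = c.toList
    · have h1 : (ch.set i v).getD i 0 = v := by
        simp only [List.getD_eq_getElem?_getD, List.getElem?_set_self hi, Option.getD_some]
      by_cases hL0 : c.toList.length = 0
      · have hread : (ch.set i v).getD (i - c.toList.length) 0 = v := by
          rw [hL0, Nat.sub_zero, h1]
        simp only [List.foldl_cons, if_pos h, if_pos hL0, h1, hread, List.set_set]
        exact ih _
      · have hne : i - c.toList.length ≠ i := by omega
        have h2 : (ch.set i v).getD (i - c.toList.length) 0 = ch.getD (i - c.toList.length) 0 := by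
          simp only [List.getD_eq_getElem?_getD, List.getElem?_set_ne (Ne.symm hne)]
        simp only [List.foldl_cons, if_pos h, if_neg hL0, h1, h2, List.set_set]
        exact ih _
    · simp only [List.foldl_cons, if_neg h]
      exact ih v

-- the outer DP invariant for A: slot j of check holds pvM (towel[:j]) once processed
lemma pvOuterA (t : List Char) (colors : List String) (n : Nat) (hn : n = t.length) :
    ∀ k, k ≤ n →
      ((List.range' 1 k).foldl (fun ch (i : Nat) =>
        colors.foldl (fun ch c =>
          if c.toList.length ≤ i ∧
              PySem.List.slice t (some ((i : Int) - (c.toList.length : Int))) (some (i : Int)) = c.toList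
          then ch.set i (ch.getD i 0 + ch.getD (i - c.toList.length) 0)
          else ch) ch) ((List.replicate (n + 1) (0 : Int)).set 0 1)).length = n + 1 ∧
      ∀ j, j ≤ n →
        ((List.range' 1 k).foldl (fun ch (i : Nat) =>
          colors.foldl (fun ch c =>
            if c.toList.length ≤ i ∧
                PySem.List.slice t (some ((i : Int) - (c.toList.length : Int))) (some (i : Int)) = c.toList
            then ch.set i (ch.getD i 0 + ch.getD (i - c.toList.length) 0)
            else ch) ch) ((List.replicate (n + 1) (0 : Int)).set 0 1)).getD j 0
          = if j ≤ k then pvM (pvWlist colors) (t.take j) else 0 := by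
  intro k
  induction k with
  | zero =>
    intro _
    refine ⟨by simp, ?_⟩
    intro j hj
    by_cases hj0 : j = 0
    · subst hj0
      simp [List.getD_eq_getElem?_getD, List.take_zero, pvM_nil]
    · have hne : ¬ j ≤ 0 := by omega
      simp only [List.range'_zero, List.foldl_nil, hne, if_false]
      have hstep : ((List.replicate (n + 1) (0 : Int)).set 0 1).getD j 0
          = (List.replicate (n + 1) (0 : Int)).getD j 0 := by
        simp only [List.getD_eq_getElem?_getD, List.getElem?_set_ne (show (0 : Nat) ≠ j from Ne.symm hj0)]
      rw [hstep]
      simp [List.getD_eq_getElem?_getD]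
  | succ k ih =>
    intro hk
    obtain ⟨hlen, hval⟩ := ih (by omega)
    set ch := (List.range' 1 k).foldl (fun ch (i : Nat) =>
        colors.foldl (fun ch c =>
          if c.toList.length ≤ i ∧
              PySem.List.slice t (some ((i : Int) - (c.toList.length : Int))) (some (i : Int)) = c.toList
          then ch.set i (ch.getD i 0 + ch.getD (i - c.toList.length) 0)
          else ch) ch) ((List.replicate (n + 1) (0 : Int)).set 0 1) with hch
    have hrange : List.range' 1 (k + 1) = List.range' 1 k ++ [k + 1] := by
      simpa [Nat.add_comm] using List.range'_concat (s := 1) (n := k) (step := 1)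
    have hik : k + 1 < ch.length := by omega
    have hch0 : ch.getD (k + 1) 0 = 0 := by
      have := hval (k + 1) hk
      simpa [show ¬ (k + 1 ≤ k) by omega] using this
    have hset : ch.set (k + 1) (ch.getD (k + 1) 0) = ch := by
      have hg : ch.getD (k + 1) 0 = ch[k + 1]'hik := by
        simp [List.getD_eq_getElem?_getD, List.getElem?_eq_getElem hik]
      rw [hg]
      exact List.set_getElem_self hik
    have hcell : colors.foldl (fun a c =>
          if c.toList.length ≤ (k + 1) ∧
              PySem.List.slice t (some (((k + 1 : Nat) : Int) - (c.toList.length : Int))) (some ((k + 1 : Nat) : Int)) = c.toList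
          then a + (if c.toList.length = 0 then a else ch.getD (k + 1 - c.toList.length) 0)
          else a) 0
        = 2 ^ (colors.count "") * 0
          + ((pvWlist colors).map (fun p =>
              if p.2.toList.length ≤ (k + 1) ∧
                  PySem.List.slice t (some (((k + 1 : Nat) : Int) - (p.2.toList.length : Int))) (some ((k + 1 : Nat) : Int)) = p.2.toList
              then p.1 * ch.getD (k + 1 - p.2.toList.length) 0
              else 0)).sum := by
      refine pvCell _ _ ?_ colors 0
      intro c hcnil
      refine ⟨by simp [hcnil], ?_⟩
      have hcast : ((k + 1 : Nat) : Int) - (c.toList.length : Int) = (((k + 1) - c.toList.length : Nat) : Int) := by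
        simp [hcnil]
      rw [hcast, PySem.List.slice_natCast, hcnil]
      simp [List.length_nil]
    have hsum : ((pvWlist colors).map (fun p =>
          if p.2.toList.length ≤ (k + 1) ∧
              PySem.List.slice t (some (((k + 1 : Nat) : Int) - (p.2.toList.length : Int))) (some ((k + 1 : Nat) : Int)) = p.2.toList
          then p.1 * ch.getD (k + 1 - p.2.toList.length) 0
          else 0)).sum
        = pvM (pvWlist colors) (t.take (k + 1)) := by
      have htne : t.take (k + 1) ≠ [] := by
        intro hnil
        have h2 := congrArg List.length hnil
        rw [List.length_take, List.length_nil] at h2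
        omega
      rw [pvM_ne_nil (pvWlist colors) (t.take (k + 1)) htne]
      refine congrArg List.sum (List.map_congr_left ?_)
      intro p hp
      have hpn : p.2.toList ≠ [] := pvWlist_ne p hp
      have hL1 : 1 ≤ p.2.toList.length := List.length_pos_iff.mpr hpn
      by_cases hcond : p.2.toList.length ≤ (k + 1) ∧
          PySem.List.slice t (some (((k + 1 : Nat) : Int) - (p.2.toList.length : Int))) (some ((k + 1 : Nat) : Int)) = p.2.toList
      · have hsfx := (pvCondA_iff t (k + 1) (by omega) p.2 hpn).mp hcond
        rw [if_pos hcond, if_pos hsfx]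
        have htk : (t.take (k + 1)).take ((t.take (k + 1)).length - p.2.toList.length)
            = t.take (k + 1 - p.2.toList.length) := by
          rw [List.take_take]
          congr 1
          simp only [List.length_take]
          omega
        rw [htk, hval (k + 1 - p.2.toList.length) (by omega), if_pos (by omega)]
      · rw [if_neg hcond, if_neg (fun hs => hcond ((pvCondA_iff t (k + 1) (by omega) p.2 hpn).mpr hs))]
    have hstep : (List.range' 1 (k + 1)).foldl (fun ch (i : Nat) =>
        colors.foldl (fun ch c =>
          if c.toList.length ≤ i ∧
              PySem.List.slice t (some ((i : Int) - (c.toList.length : Int))) (some (i : Int)) = c.toList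
          then ch.set i (ch.getD i 0 + ch.getD (i - c.toList.length) 0)
          else ch) ch) ((List.replicate (n + 1) (0 : Int)).set 0 1)
        = ch.set (k + 1) (pvM (pvWlist colors) (t.take (k + 1))) := by
      rw [hrange, List.foldl_append, ← hch, List.foldl_cons, List.foldl_nil]
      conv_lhs => rw [← hset]
      rw [pvInnerA t (k + 1) ch hik colors (ch.getD (k + 1) 0), hch0]
      rw [hcell, hsum]
      congr 1
      ring
    rw [hstep]
    refine ⟨by simp [hlen], ?_⟩
    intro j hj
    by_cases hjk : j = k + 1
    · subst hjk
      rw [if_pos (le_refl _)]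
      simp [List.getD_eq_getElem?_getD, List.getElem?_set_self hik]
    · have hgd : (ch.set (k + 1) (pvM (pvWlist colors) (t.take (k + 1)))).getD j 0 = ch.getD j 0 := by
        simp only [List.getD_eq_getElem?_getD, List.getElem?_set_ne (show k + 1 ≠ j from fun h => hjk h.symm)]
      rw [hgd, hval j hj]
      by_cases hjle : j ≤ k
      · rw [if_pos hjle, if_pos (by omega)]
      · rw [if_neg hjle, if_neg (by omega)]

-- port A computes pvM on prefixes
lemma pvA_eq (towel : String) (colors : List String) :
    count_compositions towel colors = pvM (pvWlist colors) towel.toList := by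
  unfold count_compositions
  obtain ⟨-, hval⟩ := pvOuterA towel.toList colors towel.toList.length rfl towel.toList.length (le_refl _)
  have := hval towel.toList.length (le_refl _)
  rw [if_pos (le_refl _), List.take_length] at this
  simpa using this

-- ---- B side ----

-- occurrence positions of c in t at or after k
def pvOccs (t c : List Char) (k : Nat) : List Nat :=
  (List.range' k (t.length + 1 - k)).filter (fun p => decide (c <+: t.drop p))

-- one push of the find loop, in Nat form
def pvPush (c : List Char) (e : List (List Int)) (p : Nat) : List (List Int) :=
  PySem.List.pySetD e ((p : Int) + (c.length : Int))
    (PySem.List.pyGetD e ((p : Int) + (c.length : Int)) [] ++ [(p : Int)])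

-- CPython: find with a start past len(s) answers -1 even for the empty pattern
lemma pvFindFrom_past (t c : List Char) :
    PySem.Chars.findFrom t c ((t.length + 1 : Nat) : Int) none = -1 := by
  unfold PySem.Chars.findFrom
  have h1 : ¬ (((t.length + 1 : Nat) : Int) < 0) := by omega
  have h2 : ((t.length : Nat) : Int) < ((t.length + 1 : Nat) : Int) := by omega
  simp only [if_neg h1, if_pos h2]

-- the find loop enumerates exactly the occurrences ≥ k, in order
lemma pvOccLoop_eq (t c : List Char) :
    ∀ (fuel k : Nat) (e : List (List Int)), k ≤ t.length + 1 → t.length + 2 - k ≤ fuel →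
      pvOccLoop t c fuel e (PySem.Chars.findFrom t c (k : Int) none)
      = (pvOccs t c k).foldl (pvPush c) e := by
  intro fuel
  induction fuel with
  | zero => intro k e hk hf; omega
  | succ fuel ih =>
    intro k e hk hf
    by_cases hkpast : k = t.length + 1
    · subst hkpast
      rw [pvFindFrom_past, pvOccLoop, if_pos rfl, pvOccs,
        show t.length + 1 - (t.length + 1) = 0 from by omega]
      simp
    · have hk' : k ≤ t.length := by omega
      by_cases hfind : PySem.Chars.findFrom t c (k : Int) none = -1
      · have hocc : pvOccs t c k = [] := by
          rw [pvOccs, List.filter_eq_nil_iff]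
          intro p hp
          simp only [decide_eq_true_eq]
          intro hpre
          have hnin := (PySem.Chars.findFrom_natCast_eq_neg_one_iff t c k hk').mp hfind
          apply hnin
          have hkp : k ≤ p := (List.mem_range'_1.mp hp).1
          have hdd : t.drop p = (t.drop k).drop (p - k) := by
            rw [List.drop_drop]; congr 1; omega
          rw [hdd] at hpre
          exact hpre.isInfix.trans (List.drop_suffix _ _).isInfix
        rw [hocc, List.foldl_nil, pvOccLoop, hfind, if_pos rfl]
      · obtain ⟨hkp, hpre, hmin⟩ := PySem.Chars.findFrom_natCast_spec t c k hk' hfind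
        set p := PySem.Chars.findFrom t c (k : Int) none with hpdef
        have hp0 : (0 : Int) ≤ p := le_trans (by positivity) hkp
        have hple : p.toNat ≤ t.length := by
          have hcast := PySem.Chars.findFrom_natCast t c k hk'
          rw [← hpdef] at hcast
          by_cases hz : PySem.Chars.find (t.drop k) c = -1
          · rw [if_pos hz] at hcast; omega
          · rw [if_neg hz] at hcast
            have hle := PySem.Chars.find_le_length (t.drop k) c
            rw [List.length_drop] at hle
            omega
        have hkpn : k ≤ p.toNat := by omega
        have hocc : pvOccs t c k = p.toNat :: pvOccs t c (p.toNat + 1) := by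
          have hsplit : List.range' k (t.length + 1 - k)
              = List.range' k (p.toNat - k) ++ List.range' p.toNat (t.length + 1 - p.toNat) := by
            have h := List.range'_append_1 (s := k) (m := p.toNat - k) (n := t.length + 1 - p.toNat)
            rw [show k + (p.toNat - k) = p.toNat from by omega,
              show (p.toNat - k) + (t.length + 1 - p.toNat) = t.length + 1 - k from by omega] at h
            exact h.symm
          rw [pvOccs, hsplit, List.filter_append]
          have h1 : (List.range' k (p.toNat - k)).filter (fun q => decide (c <+: t.drop q)) = [] := by
            rw [List.filter_eq_nil_iff]
            intro q hq
            simp only [decide_eq_true_eq]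
            obtain ⟨hq1, hq2⟩ := List.mem_range'_1.mp hq
            exact hmin q hq1 (by omega)
          have h2 : List.range' p.toNat (t.length + 1 - p.toNat)
              = p.toNat :: List.range' (p.toNat + 1) (t.length + 1 - (p.toNat + 1)) := by
            rw [show t.length + 1 - p.toNat = (t.length + 1 - (p.toNat + 1)) + 1 from by omega,
              List.range'_succ]
          rw [h1, h2, List.nil_append, List.filter_cons_of_pos (by simpa using hpre)]
          rfl
        rw [hocc, List.foldl_cons, pvOccLoop, if_neg hfind]
        have hcast1 : p + 1 = ((p.toNat + 1 : Nat) : Int) := by omega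
        have hcast2 : p = ((p.toNat : Nat) : Int) := by omega
        have hpush : PySem.List.pySetD e (p + (c.length : Int))
              (PySem.List.pyGetD e (p + (c.length : Int)) [] ++ [p])
            = pvPush c e p.toNat := by
          unfold pvPush
          rw [← hcast2]
        rw [hcast1, hpush]
        exact ih (p.toNat + 1) (pvPush c e p.toNat) (by omega) (by omega)

-- pushing a list of positions appends to the matching slots
lemma pvPush_fold (c : List Char) (L : List Nat) :
    ∀ (e : List (List Int)) (j : Nat), j < e.length → (∀ p ∈ L, p + c.length < e.length) →
      ((L.foldl (pvPush c) e).length = e.length ∧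
       (L.foldl (pvPush c) e).getD j []
         = e.getD j [] ++ (L.filter (fun p => decide (p + c.length = j))).map (fun p => (p : Int))) := by
  induction L with
  | nil => intro e j hj _; exact ⟨rfl, by simp⟩
  | cons p L ih =>
    intro e j hj hlt
    have hp : p + c.length < e.length := hlt p List.mem_cons_self
    have hcast : ((p : Int) + (c.length : Int)) = ((p + c.length : Nat) : Int) := by push_cast; ring
    have hstep : pvPush c e p = e.set (p + c.length) (e.getD (p + c.length) [] ++ [(p : Int)]) := by
      unfold pvPush
      rw [hcast, PySem.List.pySetD_natCast, PySem.List.pyGetD_natCast]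
    have hlen' : (pvPush c e p).length = e.length := by rw [hstep, List.length_set]
    obtain ⟨hlen2, hval2⟩ := ih (pvPush c e p) j (by omega)
      (fun q hq => by rw [hlen']; exact hlt q (List.mem_cons_of_mem _ hq))
    refine ⟨by rw [List.foldl_cons, hlen2, hlen'], ?_⟩
    rw [List.foldl_cons, hval2]
    by_cases hpj : p + c.length = j
    · rw [List.filter_cons_of_pos (by simpa using hpj)]
      have hg : (pvPush c e p).getD j [] = e.getD j [] ++ [(p : Int)] := by
        rw [hstep, hpj]
        simp [List.getD_eq_getElem?_getD, List.getElem?_set_self (hpj ▸ hp)]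
      rw [hg]
      simp [List.append_assoc]
    · rw [List.filter_cons_of_neg (by simpa using hpj)]
      have hg : (pvPush c e p).getD j [] = e.getD j [] := by
        rw [hstep]
        simp [List.getD_eq_getElem?_getD, List.getElem?_set_ne hpj]
      rw [hg]

-- a Nodup list contains at most one solution of p + m = j
lemma pvFilter_unique (L : List Nat) (hnd : L.Nodup) (m j : Nat) :
    L.filter (fun p => decide (p + m = j))
      = if m ≤ j ∧ (j - m) ∈ L then [j - m] else [] := by
  induction L with
  | nil => simp
  | cons p L ih =>
    obtain ⟨hpL, hL⟩ := List.nodup_cons.mp hnd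
    by_cases hp : p + m = j
    · have hm : m ≤ j := by omega
      have hpe : p = j - m := by omega
      rw [List.filter_cons_of_pos (by simpa using hp), ih hL,
        if_neg (by rintro ⟨-, hmem⟩; exact hpL (hpe ▸ hmem)),
        if_pos ⟨hm, by simp [← hpe]⟩, hpe]
    · rw [List.filter_cons_of_neg (by simpa using hp), ih hL]
      by_cases hm : m ≤ j
      · have hne : j - m ≠ p := by omega
        simp only [List.mem_cons, hne, false_or]
      · simp [hm]

-- a nonempty piece matching at j - |c| is exactly a nonempty suffix of towel[:j]
lemma pvEnd_iff (t c : List Char) (j : Nat) (hj : j ≤ t.length) (hc : c ≠ []) :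
    (c.length ≤ j ∧ c <+: t.drop (j - c.length)) ↔ c <:+ t.take j := by
  have hlen : (t.take j).length = j := by simp; omega
  constructor
  · rintro ⟨hm, hp⟩
    rw [List.suffix_iff_eq_drop, hlen, List.drop_take,
      show j - (j - c.length) = c.length from by omega]
    exact List.prefix_iff_eq_take.mp hp
  · intro hs
    have hm : c.length ≤ j := by
      have := hs.length_le
      rw [hlen] at this
      omega
    refine ⟨hm, ?_⟩
    have heq := List.suffix_iff_eq_drop.mp hs
    rw [hlen, List.drop_take, show j - (j - c.length) = c.length from by omega] at heq
    exact List.prefix_iff_eq_take.mpr heq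

-- the per-position entry each color contributes to edges[j] (an "" contributes
-- the self-position j, exactly the in-place doubling read)
def pvEntry (t : List Char) (j : Nat) (c : String) : Option Int :=
  if c.toList = [] then some (j : Int)
  else if c.toList <:+ t.take j then some ((j : Int) - (c.toList.length : Int))
  else none

-- the color fold, from an arbitrary table of the right length
lemma pvEdgesAux (t : List Char) (n : Nat) (hn : n = t.length) :
    ∀ (cs : List String) (e : List (List Int)), e.length = n + 1 →
      ∀ j, j ≤ n →
      ((cs.foldl (fun e c => pvOccLoop t c.toList (n + 2) e (PySem.Chars.find t c.toList)) e).length = n + 1 ∧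
       (cs.foldl (fun e c => pvOccLoop t c.toList (n + 2) e (PySem.Chars.find t c.toList)) e).getD j []
         = e.getD j [] ++ cs.filterMap (pvEntry t j)) := by
  intro cs
  induction cs with
  | nil => intro e he j hj; exact ⟨he, by simp⟩
  | cons c cs ih =>
    intro e he j hj
    have hstep : pvOccLoop t c.toList (n + 2) e (PySem.Chars.find t c.toList)
        = (pvOccs t c.toList 0).foldl (pvPush c.toList) e := by
      have h := pvOccLoop_eq t c.toList (n + 2) 0 e (by omega) (by omega)
      simpa using h
    obtain ⟨hplen, hpval⟩ := pvPush_fold c.toList (pvOccs t c.toList 0) e j (by omega)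
      (fun p hp => by
        have hm := List.mem_filter.mp hp
        have hpr : p < t.length + 1 := by
          have := (List.mem_range'_1.mp hm.1).2
          omega
        have hpm : c.toList <+: t.drop p := by simpa using hm.2
        have hle := hpm.length_le
        rw [List.length_drop] at hle
        omega)
    obtain ⟨hlen2, hval2⟩ := ih ((pvOccs t c.toList 0).foldl (pvPush c.toList) e)
        (by rw [hplen, he]) j hj
    refine ⟨by rw [List.foldl_cons, hstep]; exact hlen2, ?_⟩
    rw [List.foldl_cons, hstep, hval2, hpval, List.append_assoc]
    congr 1
    have hnd : (pvOccs t c.toList 0).Nodup :=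
      List.Nodup.filter _ (List.nodup_range')
    rw [pvFilter_unique _ hnd]
    by_cases hcnil : c.toList = []
    · have hmem : (j - c.toList.length) ∈ pvOccs t c.toList 0 := by
        rw [pvOccs]
        refine List.mem_filter.mpr ⟨List.mem_range'_1.mpr ⟨by omega, by simp [hcnil]; omega⟩, ?_⟩
        simp [hcnil]
      rw [if_pos ⟨by simp [hcnil], hmem⟩,
        List.filterMap_cons_some (show pvEntry t j c = some (j : Int) from by rw [pvEntry, if_pos hcnil])]
      simp [hcnil]
    · by_cases hS : c.toList <:+ t.take j
      · obtain ⟨hm, hp⟩ := (pvEnd_iff t c.toList j (by omega) hcnil).mpr hS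
        have hmem : (j - c.toList.length) ∈ pvOccs t c.toList 0 := by
          rw [pvOccs]
          refine List.mem_filter.mpr ⟨List.mem_range'_1.mpr ⟨by omega, by omega⟩, by simpa using hp⟩
        rw [if_pos ⟨hm, hmem⟩,
          List.filterMap_cons_some (show pvEntry t j c = some ((j : Int) - (c.toList.length : Int)) from by
            rw [pvEntry, if_neg hcnil, if_pos hS])]
        have hm' : c.length ≤ j := by simpa using hm
        simp
        omega
      · have hnc : ¬ (c.toList.length ≤ j ∧ (j - c.toList.length) ∈ pvOccs t c.toList 0) := by
          rintro ⟨hm, hmem⟩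
          have hp : c.toList <+: t.drop (j - c.toList.length) := by
            have := (List.mem_filter.mp hmem).2
            simpa using this
          exact hS ((pvEnd_iff t c.toList j (by omega) hcnil).mp ⟨hm, hp⟩)
        rw [if_neg hnc,
          List.filterMap_cons_none (show pvEntry t j c = none from by
            rw [pvEntry, if_neg hcnil, if_neg hS])]
        simp

-- the inner loop over edges[j], started from w.set j v, only rewrites slot j
lemma pvInnerB (j : Nat) (w : List Int) (hj : j < w.length) (es : List Int)
    (hes : ∀ i ∈ es, 0 ≤ i) :
    ∀ v : Int,
      es.foldl (fun w (i : Int) =>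
        PySem.List.pySetD w (j : Int)
          (PySem.List.pyGetD w (j : Int) 0 + PySem.List.pyGetD w i 0)) (w.set j v)
      = w.set j (es.foldl (fun a i =>
          a + (if i = (j : Int) then a else w.getD i.toNat 0)) v) := by
  induction es with
  | nil => intro v; simp
  | cons i es ih =>
    intro v
    have hi0 : (0 : Int) ≤ i := hes i List.mem_cons_self
    have hes' : ∀ i ∈ es, (0 : Int) ≤ i := fun q hq => hes q (List.mem_cons_of_mem _ hq)
    have hr1 : PySem.List.pyGetD (w.set j v) ((j : Nat) : Int) 0 = v := by
      rw [PySem.List.pyGetD_natCast]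
      simp only [List.getD_eq_getElem?_getD, List.getElem?_set_self hj, Option.getD_some]
    have hr2 : PySem.List.pyGetD (w.set j v) i 0
        = (if i = (j : Int) then v else w.getD i.toNat 0) := by
      by_cases hij : i = (j : Int)
      · rw [if_pos hij, hij]; exact hr1
      · have hne : i.toNat ≠ j := by omega
        rw [if_neg hij, show i = ((i.toNat : Nat) : Int) from by omega, PySem.List.pyGetD_natCast]
        simp only [List.getD_eq_getElem?_getD, List.getElem?_set_ne (Ne.symm hne),
          Int.toNat_natCast]
    rw [List.foldl_cons,
      show PySem.List.pySetD (w.set j v) ((j : Nat) : Int)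
          (PySem.List.pyGetD (w.set j v) ((j : Nat) : Int) 0 + PySem.List.pyGetD (w.set j v) i 0)
        = w.set j (v + (if i = (j : Int) then v else w.getD i.toNat 0)) from by
          rw [hr1, hr2, PySem.List.pySetD_natCast, List.set_set],
      List.foldl_cons]
    exact ih hes' _

-- every edges[j] entry is a nonnegative index
lemma pvEntry_nonneg (t : List Char) (j : Nat) (cs : List String) :
    ∀ i ∈ cs.filterMap (pvEntry t j), (0 : Int) ≤ i := by
  intro i hi
  obtain ⟨c, -, hc⟩ := List.mem_filterMap.mp hi
  rw [pvEntry] at hc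
  split at hc
  · simp only [Option.some.injEq] at hc
    omega
  · split at hc
    · rename_i hS
      have hle := hS.length_le
      rw [List.length_take] at hle
      simp only [Option.some.injEq] at hc
      omega
    · exact absurd hc (by simp)

-- the fold over the indexed entries is the fold over colors with the doubling read
lemma pvFoldFM (t : List Char) (k : Nat) (w : List Int) :
    ∀ (cs : List String) (v : Int),
      (cs.filterMap (pvEntry t k)).foldl (fun a i =>
          a + (if i = (k : Int) then a else w.getD i.toNat 0)) v
      = cs.foldl (fun a c =>
          if (c.toList = [] ∨ c.toList <:+ t.take k)
          then a + (if c.toList.length = 0 then a else w.getD (k - c.toList.length) 0)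
          else a) v := by
  intro cs
  induction cs with
  | nil => intro v; simp
  | cons c cs ih =>
    intro v
    rw [List.foldl_cons]
    by_cases hcnil : c.toList = []
    · rw [List.filterMap_cons_some (show pvEntry t k c = some (k : Int) from by
          rw [pvEntry, if_pos hcnil]),
        List.foldl_cons, if_pos rfl,
        if_pos (Or.inl hcnil), if_pos (show c.toList.length = 0 by simp [hcnil])]
      exact ih _
    · have hL0 : c.toList.length ≠ 0 := fun h => hcnil (List.eq_nil_of_length_eq_zero h)
      by_cases hS : c.toList <:+ t.take k
      · have hm : c.toList.length ≤ k := by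
          have := hS.length_le
          rw [List.length_take] at this
          omega
        rw [List.filterMap_cons_some (show pvEntry t k c = some ((k : Int) - (c.toList.length : Int)) from by
            rw [pvEntry, if_neg hcnil, if_pos hS]),
          List.foldl_cons,
          if_neg (show (k : Int) - (c.toList.length : Int) ≠ (k : Int) from by omega),
          show ((k : Int) - (c.toList.length : Int)).toNat = k - c.toList.length from by omega,
          if_pos (Or.inr hS), if_neg hL0]
        exact ih _
      · rw [List.filterMap_cons_none (show pvEntry t k c = none from by
            rw [pvEntry, if_neg hcnil, if_neg hS]),
          if_neg (show ¬ (c.toList = [] ∨ c.toList <:+ t.take k) from by tauto)]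
        exact ih _

-- the outer DP invariant for B: slot j of ways holds pvM (towel[:j]) once processed
lemma pvWaysInv (t : List Char) (colors : List String) (n : Nat) (hn : n = t.length)
    (E : List (List Int))
    (hE : ∀ j, j ≤ n → E.getD j [] = colors.filterMap (pvEntry t j)) :
    ∀ k, k ≤ n →
      ((List.range' 1 k).foldl (fun w (j : Nat) =>
        (PySem.List.pyGetD E (j : Int) []).foldl (fun w (i : Int) =>
          PySem.List.pySetD w (j : Int)
            (PySem.List.pyGetD w (j : Int) 0 + PySem.List.pyGetD w i 0)) w)
        ((1 : Int) :: List.replicate n 0)).length = n + 1 ∧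
      ∀ j, j ≤ n →
        ((List.range' 1 k).foldl (fun w (j : Nat) =>
          (PySem.List.pyGetD E (j : Int) []).foldl (fun w (i : Int) =>
            PySem.List.pySetD w (j : Int)
              (PySem.List.pyGetD w (j : Int) 0 + PySem.List.pyGetD w i 0)) w)
          ((1 : Int) :: List.replicate n 0)).getD j 0
          = if j ≤ k then pvM (pvWlist colors) (t.take j) else 0 := by
  intro k
  induction k with
  | zero =>
    intro _
    refine ⟨by simp, ?_⟩
    intro j hj
    by_cases hj0 : j = 0
    · subst hj0
      simp [List.take_zero, pvM_nil]
    · have hnle : ¬ j ≤ 0 := by omega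
      simp only [List.range'_zero, List.foldl_nil, hnle, if_false]
      obtain ⟨j', rfl⟩ : ∃ j', j = j' + 1 := ⟨j - 1, by omega⟩
      simp [List.getD_eq_getElem?_getD]
  | succ k ih =>
    intro hk
    obtain ⟨hlen, hval⟩ := ih (by omega)
    set w := (List.range' 1 k).foldl (fun w (j : Nat) =>
        (PySem.List.pyGetD E (j : Int) []).foldl (fun w (i : Int) =>
          PySem.List.pySetD w (j : Int)
            (PySem.List.pyGetD w (j : Int) 0 + PySem.List.pyGetD w i 0)) w)
      ((1 : Int) :: List.replicate n 0) with hw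
    have hrange : List.range' 1 (k + 1) = List.range' 1 k ++ [k + 1] := by
      simpa [Nat.add_comm] using List.range'_concat (s := 1) (n := k) (step := 1)
    have hik : k + 1 < w.length := by omega
    have hw0 : w.getD (k + 1) 0 = 0 := by
      have := hval (k + 1) hk
      simpa [show ¬ (k + 1 ≤ k) by omega] using this
    have hset : w.set (k + 1) (w.getD (k + 1) 0) = w := by
      have hg : w.getD (k + 1) 0 = w[k + 1]'hik := by
        simp [List.getD_eq_getElem?_getD, List.getElem?_eq_getElem hik]
      rw [hg]
      exact List.set_getElem_self hik
    -- the scalar fold over edges[k+1] equals the weighted color fold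
    have hcell : (colors.filterMap (pvEntry t (k + 1))).foldl (fun a i =>
          a + (if i = ((k + 1 : Nat) : Int) then a else w.getD i.toNat 0)) 0
        = pvM (pvWlist colors) (t.take (k + 1)) := by
      rw [pvFoldFM t (k + 1) w colors 0]
      rw [pvCell (fun c => c.toList = [] ∨ c.toList <:+ t.take (k + 1))
        (fun c => w.getD (k + 1 - c.toList.length) 0) (fun c h => Or.inl h) colors 0]
      have htne : t.take (k + 1) ≠ [] := by
        intro hnil
        have h2 := congrArg List.length hnil
        rw [List.length_take, List.length_nil] at h2
        omega
      rw [pvM_ne_nil (pvWlist colors) (t.take (k + 1)) htne]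
      have hsum : ((pvWlist colors).map (fun p =>
            if (p.2.toList = [] ∨ p.2.toList <:+ t.take (k + 1))
            then p.1 * w.getD (k + 1 - p.2.toList.length) 0
            else 0)).sum
          = ((pvWlist colors).map (fun p =>
              if p.2.toList ≠ [] ∧ p.2.toList <:+ t.take (k + 1)
              then p.1 * pvM (pvWlist colors) ((t.take (k + 1)).take ((t.take (k + 1)).length - p.2.toList.length))
              else 0)).sum := by
        refine congrArg List.sum (List.map_congr_left ?_)
        intro p hp
        have hpn : p.2.toList ≠ [] := pvWlist_ne p hp
        have hL1 : 1 ≤ p.2.toList.length := List.length_pos_iff.mpr hpn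
        by_cases hS : p.2.toList <:+ t.take (k + 1)
        · have hm : p.2.toList.length ≤ k + 1 := by
            have := hS.length_le
            rw [List.length_take] at this
            omega
          rw [if_pos (Or.inr hS), if_pos ⟨hpn, hS⟩]
          have htk : (t.take (k + 1)).take ((t.take (k + 1)).length - p.2.toList.length)
              = t.take (k + 1 - p.2.toList.length) := by
            rw [List.take_take]
            congr 1
            simp only [List.length_take]
            omega
          rw [htk, hval (k + 1 - p.2.toList.length) (by omega), if_pos (by omega)]
        · rw [if_neg (by tauto), if_neg (fun h => hS h.2)]
      rw [hsum]
      ring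
    have hstep : (List.range' 1 (k + 1)).foldl (fun w (j : Nat) =>
        (PySem.List.pyGetD E (j : Int) []).foldl (fun w (i : Int) =>
          PySem.List.pySetD w (j : Int)
            (PySem.List.pyGetD w (j : Int) 0 + PySem.List.pyGetD w i 0)) w)
        ((1 : Int) :: List.replicate n 0)
        = w.set (k + 1) (pvM (pvWlist colors) (t.take (k + 1))) := by
      rw [hrange, List.foldl_append, ← hw, List.foldl_cons, List.foldl_nil]
      conv_lhs => rw [← hset]
      rw [PySem.List.pyGetD_natCast, show E.getD (k + 1) [] = colors.filterMap (pvEntry t (k + 1)) from hE (k + 1) hk,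
        pvInnerB (k + 1) w hik _ (pvEntry_nonneg t (k + 1) colors) (w.getD (k + 1) 0), hw0, hcell]
    rw [hstep]
    refine ⟨by simp [hlen], ?_⟩
    intro j hj
    by_cases hjk : j = k + 1
    · subst hjk
      rw [if_pos (le_refl _)]
      simp [List.getD_eq_getElem?_getD, List.getElem?_set_self hik]
    · have hgd : (w.set (k + 1) (pvM (pvWlist colors) (t.take (k + 1)))).getD j 0 = w.getD j 0 := by
        simp only [List.getD_eq_getElem?_getD, List.getElem?_set_ne (show k + 1 ≠ j from fun h => hjk h.symm)]
      rw [hgd, hval j hj]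
      by_cases hjle : j ≤ k
      · rw [if_pos hjle, if_pos (by omega)]
      · rw [if_neg hjle, if_neg (by omega)]

-- port B computes pvM on prefixes too
lemma pvB_eq (towel : String) (colors : List String) :
    count_compositions_alt towel colors = pvM (pvWlist colors) towel.toList := by
  unfold count_compositions_alt
  have hE : ∀ j, j ≤ towel.toList.length →
      (colors.foldl (fun e c =>
          pvOccLoop towel.toList c.toList (towel.toList.length + 2) e
            (PySem.Chars.find towel.toList c.toList))
        (List.replicate (towel.toList.length + 1) [])).getD j []
      = colors.filterMap (pvEntry towel.toList j) := by
    intro j hj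
    obtain ⟨-, hval⟩ := pvEdgesAux towel.toList towel.toList.length rfl colors
      (List.replicate (towel.toList.length + 1) []) (by simp) j hj
    rw [hval]
    simp [List.getD_eq_getElem?_getD]
  obtain ⟨-, hval⟩ := pvWaysInv towel.toList colors towel.toList.length rfl _ hE
    towel.toList.length (le_refl _)
  have hfin := hval towel.toList.length (le_refl _)
  rw [if_pos (le_refl _), List.take_length] at hfin
  simpa using hfin

-- ===== VERDICT (by name: the statement is the Claim_ definition above) =====
theorem count_compositions_spec : Claim_equal_count_compositions := by
  intro towel colors _
  unfold Spec_count_compositions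
  rw [pvA_eq, pvB_eq]
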